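-- pv_equiv track=rewrite | github.com/cthrax/advent_code_2021 | Dec7/problem2.py | createLookupTable
-- ===== SOURCE A (Python) =====
-- def createLookupTable(maxValue):
--     table = {}
--     fuelCost = 0
--     totalCost = 0
--     for movement in range(0, maxValue + 1):
--         totalCost += fuelCost
--         fuelCost += 1
--         table[movement] = totalCost
--     return table
-- ===== SOURCE B (Python) =====
-- def createLookupTable(maxValue):
--     return {m: m * (m + 1) // 2 for m in range(0, maxValue + 1)}
-- ===== Notes on version B (the rewrite author's own statement) =====
-- stated objective: simpler
-- what changed: Replaced the running fuelCost/totalCost accumulators with a direct closed-form triangular-number formula m*(m+1)//2 per key, built in a single dict comprehension.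
import Mathlib
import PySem

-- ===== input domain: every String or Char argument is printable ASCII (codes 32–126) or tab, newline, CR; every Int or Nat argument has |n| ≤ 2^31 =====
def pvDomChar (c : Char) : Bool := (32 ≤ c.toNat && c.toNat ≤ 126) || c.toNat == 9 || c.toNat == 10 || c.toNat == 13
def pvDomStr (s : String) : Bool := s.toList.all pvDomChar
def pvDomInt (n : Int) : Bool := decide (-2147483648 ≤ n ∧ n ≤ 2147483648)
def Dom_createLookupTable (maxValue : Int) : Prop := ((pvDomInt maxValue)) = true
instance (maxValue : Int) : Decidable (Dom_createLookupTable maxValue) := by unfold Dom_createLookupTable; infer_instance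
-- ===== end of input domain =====

-- B replaces A's running fuelCost/totalCost accumulators by the closed-form
-- triangular-number formula m*(m+1)//2 per key (objective: simpler).

-- ===== PORT A =====
-- literal port: dict + two running accumulators, updated per loop iteration
def createLookupTable (maxValue : Int) : List (Int × Int) :=
  (PySem.List.pyRange 0 (maxValue + 1) 1).foldl
    (fun (st : PySem.Dict Int Int × Int × Int) movement =>
      let totalCost := st.2.2 + st.2.1
      let fuelCost := st.2.1 + 1
      (st.1.insert movement totalCost, fuelCost, totalCost))
    (PySem.Dict.empty, 0, 0) |>.1.items

-- ===== PORT B =====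
-- literal port of Source B: dict comprehension, each value computed by the closed form
def createLookupTable_alt (maxValue : Int) : List (Int × Int) :=
  (PySem.List.pyRange 0 (maxValue + 1) 1).map
    (fun m => (m, PySem.Int.floordiv (m * (m + 1)) 2))

-- ===== PRECONDITION & SPEC =====
def Spec_createLookupTable (maxValue : Int) (out : List (Int × Int)) : Prop := out = createLookupTable_alt maxValue
instance (maxValue : Int) (out : List (Int × Int)) : Decidable (Spec_createLookupTable maxValue out) := by unfold Spec_createLookupTable; infer_instance

-- ===== CLAIM (what is proved, stated in full; the proofs are below) =====
def Claim_equal_createLookupTable : Prop := ∀ (maxValue : Int), Dom_createLookupTable maxValue → Spec_createLookupTable maxValue (createLookupTable maxValue)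

-- ===== LEMMAS AND PROOFS =====

-- totalCost after n iterations equals the closed form at n-1, stepped once more
lemma pv_tri_step (n : Nat) :
    PySem.Int.floordiv (((n : Int) - 1) * n) 2 + n
      = PySem.Int.floordiv ((n : Int) * ((n : Int) + 1)) 2 := by
  cases n with
  | zero => decide
  | succ m =>
    have h1 : (((m + 1 : Nat) : Int) - 1) * ((m + 1 : Nat) : Int)
        = ((m * (m + 1) : Nat) : Int) := by push_cast; ring
    have h2 : ((m + 1 : Nat) : Int) * (((m + 1 : Nat) : Int) + 1)
        = (((m + 1) * (m + 2) : Nat) : Int) := by push_cast; ring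
    rw [h1, h2, show (2:Int) = ((2:Nat):Int) from rfl,
        PySem.Int.floordiv_natCast, PySem.Int.floordiv_natCast]
    have h3 : (m + 1) * (m + 2) = m * (m + 1) + 2 * (m + 1) := by ring
    have h4 : m * (m + 1) / 2 + (m + 1) = (m + 1) * (m + 2) / 2 := by omega
    exact_mod_cast h4

-- loop invariant: after processing range(0, n), the dict holds the closed-form
-- table, fuelCost = n and totalCost = (n-1)*n//2
lemma pv_loop (n : Nat) :
    (PySem.List.pyRange 0 (n : Int) 1).foldl
      (fun (st : PySem.Dict Int Int × Int × Int) movement =>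
        let totalCost := st.2.2 + st.2.1
        let fuelCost := st.2.1 + 1
        (st.1.insert movement totalCost, fuelCost, totalCost))
      (PySem.Dict.empty, 0, 0)
    = (⟨(PySem.List.pyRange 0 (n : Int) 1).map
          (fun m => (m, PySem.Int.floordiv (m * (m + 1)) 2))⟩,
       (n : Int), PySem.Int.floordiv (((n : Int) - 1) * n) 2) := by
  induction n with
  | zero =>
    show _ = ((PySem.Dict.mk _), _, _)
    norm_num [PySem.List.pyRange]
    decide
  | succ m ih =>
    have hcast : ((m + 1 : Nat) : Int) = (m : Int) + 1 := by push_cast; ring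
    rw [hcast, PySem.List.pyRange_one_succ_right (by positivity : (0:Int) ≤ m),
        List.foldl_append, ih]
    have hnc : (PySem.Dict.mk ((PySem.List.pyRange 0 (m : Int) 1).map
        (fun x => (x, PySem.Int.floordiv (x * (x + 1)) 2)))).contains (m : Int) = false := by
      rw [PySem.Dict.contains_mk]
      simp only [List.any_map, List.any_eq_false]
      intro x hx
      have := PySem.List.mem_pyRange_one.mp hx
      simp only [Function.comp]
      simp only [beq_iff_eq]
      omega
    simp only [List.foldl_cons, List.foldl_nil]
    apply Prod.ext
    · apply PySem.Dict.ext
      rw [PySem.Dict.items_insert_of_not_contains _ _ hnc]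
      show _ ++ _ = List.map _ _
      rw [List.map_append]
      congr 1
      simp only [List.map_cons, List.map_nil, List.cons.injEq, Prod.mk.injEq, and_true, true_and]
      exact pv_tri_step m
    · apply Prod.ext
      · show (m : Int) + 1 = _; rfl
      · show PySem.Int.floordiv (((m : Int) - 1) * m) 2 + m = _
        rw [pv_tri_step m]
        congr 1
        ring

-- ===== VERDICT (by name: the statement is the Claim_ definition above) =====
theorem createLookupTable_spec : Claim_equal_createLookupTable := by
  intro maxValue _
  show createLookupTable maxValue = createLookupTable_alt maxValue
  unfold createLookupTable createLookupTable_alt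
  by_cases h : 0 ≤ maxValue + 1
  · have hb : maxValue + 1 = ((maxValue + 1).toNat : Int) := by omega
    rw [hb, pv_loop]
  · have hempty : PySem.List.pyRange 0 (maxValue + 1) 1 = [] := by
      apply List.eq_nil_iff_forall_not_mem.mpr
      intro x hx
      have := PySem.List.mem_pyRange_one.mp hx
      omega
    rw [hempty]; rfl
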